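-- pv_equiv track=rewrite | github.com/JJSteph/Advent_code_2022 | 10/Day10_pt2.py | update_sprite
-- ===== SOURCE A (Python) =====
-- def update_sprite(middle):
--
--     sprite = ['.' for x in range(40)]
--
--     for i in [middle - 1, middle, middle + 1]:
--
--         if (i + 1) > len(sprite) or i < 0:
--             continue
--         else:
--             sprite[i] = '#'
--
--     return(sprite)
-- ===== SOURCE B (Python) =====
-- def update_sprite(middle):
--     return ['#' if abs(i - middle) <= 1 else '.' for i in range(40)]
-- ===== Notes on version B (the rewrite author's own statement) =====
-- stated objective: simpler
-- what changed: B decides each of the 40 cells in one comprehension by proximity |i-middle|<=1, instead of pre-filling a dot list and mutating the three candidate marker slots behind bounds guards.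
import Mathlib
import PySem

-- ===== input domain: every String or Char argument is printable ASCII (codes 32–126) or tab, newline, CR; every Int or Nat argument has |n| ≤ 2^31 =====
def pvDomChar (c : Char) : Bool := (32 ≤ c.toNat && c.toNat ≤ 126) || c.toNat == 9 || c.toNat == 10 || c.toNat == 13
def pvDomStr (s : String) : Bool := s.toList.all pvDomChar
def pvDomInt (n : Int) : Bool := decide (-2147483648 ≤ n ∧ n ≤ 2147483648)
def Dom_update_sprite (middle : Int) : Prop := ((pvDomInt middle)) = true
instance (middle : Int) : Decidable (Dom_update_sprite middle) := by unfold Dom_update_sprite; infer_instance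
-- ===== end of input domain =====

-- B decides each of the 40 cells in one pass by proximity |i - middle| <= 1, instead of
-- pre-filling a dot list and mutating the three candidate marker slots behind bounds guards.


-- ===== PORT A =====
def update_sprite (middle : Int) : List String :=
  let sprite : List String := (List.range 40).map (fun _ => ".")
  [middle - 1, middle, middle + 1].foldl (fun sprite i =>
    if i + 1 > (sprite.length : Int) ∨ i < 0 then sprite
    else sprite.set i.toNat "#") sprite

-- ===== PORT B =====
def update_sprite_alt (middle : Int) : List String :=
  (PySem.List.pyRange 0 40 1).map (fun i => if (i - middle).natAbs ≤ 1 then "#" else ".")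

-- ===== PRECONDITION & SPEC =====
def Spec_update_sprite (middle : Int) (out : List String) : Prop := out = update_sprite_alt middle
instance (middle : Int) (out : List String) : Decidable (Spec_update_sprite middle out) := by unfold Spec_update_sprite; infer_instance

-- ===== CLAIM (what is proved, stated in full; the proofs are below) =====
def Claim_equal_update_sprite : Prop := ∀ (middle : Int), Dom_update_sprite middle → Spec_update_sprite middle (update_sprite middle)

-- ===== LEMMAS AND PROOFS =====

-- out of range on both sides: A never writes, B never finds a near cell
theorem update_sprite_out (middle : Int) (h : middle < -1 ∨ 40 < middle) :
    update_sprite middle = update_sprite_alt middle := by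
  have hA : update_sprite middle = (List.range 40).map (fun _ => ".") := by
    unfold update_sprite
    simp only [List.foldl_cons, List.foldl_nil]
    split_ifs with h1 h2 h3 <;>
      first
        | rfl
        | (exfalso
           simp only [List.length_set, List.length_map, List.length_range] at *
           omega)
  have hB : update_sprite_alt middle = (List.range 40).map (fun _ => ".") := by
    unfold update_sprite_alt
    rw [PySem.List.pyRange_one]
    simp only [List.map_map]
    refine List.map_congr_left ?_
    intro k hk
    have hk' : k < 40 := by simpa using hk
    simp only [Function.comp_apply]
    rw [ite_eq_right_iff]
    intro hc
    exfalso
    omega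
  rw [hA, hB]

-- ===== VERDICT (by name: the statement is the Claim_ definition above) =====
theorem update_sprite_spec : Claim_equal_update_sprite := by
  intro middle _
  show update_sprite middle = update_sprite_alt middle
  by_cases h : -1 ≤ middle ∧ middle ≤ 40
  · obtain ⟨h1, h2⟩ := h
    interval_cases middle <;> decide
  · exact update_sprite_out middle (by omega)
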